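-- pv_equiv track=rewrite | github.com/trosine/advent-of-code | 2015/day05.py | validate_a
-- ===== SOURCE A (Python) =====
-- def validate_a(word):
--     """Is the word nice enough for part A"""
--     for disallowed in ('ab', 'cd', 'pq', 'xy'):
--         if disallowed in word:
--             return False
--     last = ''
--     doubles = 0
--     vowels = 0
--     for letter in word:
--         vowels += letter in 'aeiou'
--         doubles += last + letter == letter + letter
--         last = letter
--     return doubles >= 1 and vowels >= 3
-- ===== SOURCE B (Python) =====
-- def validate_a(word):
--     """Is the word nice enough for part A"""
--     bigrams = {word[i:i + 2] for i in range(len(word) - 1)}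
--     if bigrams & {'ab', 'cd', 'pq', 'xy'}:
--         return False
--     has_double = any(c + c in bigrams for c in set(word))
--     return has_double and sum(word.count(v) for v in 'aeiou') >= 3
-- ===== Notes on version B (the rewrite author's own statement) =====
-- stated objective: alternative
-- what changed: Instead of A's fused stateful character loop (last/doubles/vowels) plus substring scans, B materialises the set of all bigrams once, decides the forbidden-pair rule by intersecting it with the set of the four forbidden pairs, decides the double rule by probing c+c against that bigram set for each distinct character, and counts vowels by iterating the five-vowel alphabet and calling word.count(v) per vowel.
import Mathlib
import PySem

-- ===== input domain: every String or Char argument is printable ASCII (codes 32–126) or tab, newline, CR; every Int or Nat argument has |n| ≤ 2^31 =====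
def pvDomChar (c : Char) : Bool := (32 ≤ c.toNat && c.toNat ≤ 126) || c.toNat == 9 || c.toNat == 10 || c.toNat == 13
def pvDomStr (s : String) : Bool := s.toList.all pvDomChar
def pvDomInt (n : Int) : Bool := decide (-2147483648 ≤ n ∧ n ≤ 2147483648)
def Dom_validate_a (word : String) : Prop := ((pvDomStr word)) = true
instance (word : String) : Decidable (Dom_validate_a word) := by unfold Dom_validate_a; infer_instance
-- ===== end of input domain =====

-- B replaces A's fused stateful scan by a bigram-set construction: forbidden pairs by set
-- intersection, the double rule by probing c+c against the bigram set, vowels counted per vowel.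

-- ===== PORT A =====
-- the body of A's fused for-loop over the word; state = (last, doubles, vowels)
def validateAStep (s : List Char × Int × Int) (letter : Char) : List Char × Int × Int :=
  (([letter] : List Char),
   s.2.1 + (if s.1 ++ [letter] = [letter, letter] then 1 else 0),
   s.2.2 + (if letter ∈ "aeiou".toList then 1 else 0))

def validate_a (word : String) : Bool :=
  if PySem.Str.isIn "ab" word then false
  else if PySem.Str.isIn "cd" word then false
  else if PySem.Str.isIn "pq" word then false
  else if PySem.Str.isIn "xy" word then false
  else
    let r := word.toList.foldl validateAStep (([] : List Char), (0 : Int), (0 : Int))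
    decide (1 ≤ r.2.1) && decide (3 ≤ r.2.2)

-- ===== PORT B =====
-- {word[i:i+2] for i in range(len(word) - 1)} ; strings handled as their char lists
def bigramSet (l : List Char) : PySem.Set (List Char) :=
  PySem.Set.ofList ((PySem.List.pyRange 0 ((l.length : Int) - 1)).map
    (fun i => PySem.List.slice l (some i) (some (i + 2))))

def validate_a_alt (word : String) : Bool :=
  let l := word.toList
  let bigrams := bigramSet l
  if PySem.Set.inter bigrams
       (PySem.Set.ofList ["ab".toList, "cd".toList, "pq".toList, "xy".toList]) ≠ [] then
    false
  else
    let hasDouble := (PySem.Set.ofList l).any (fun c => PySem.Set.contains bigrams [c, c])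
    hasDouble &&
      decide (3 ≤ ("aeiou".toList.map (fun v => (PySem.Chars.count l [v] : Int))).sum)

-- ===== PRECONDITION & SPEC =====
def Spec_validate_a (word : String) (out : Bool) : Prop := out = validate_a_alt word
instance (word : String) (out : Bool) : Decidable (Spec_validate_a word out) := by unfold Spec_validate_a; infer_instance

-- ===== CLAIM (what is proved, stated in full; the proofs are below) =====
def Claim_equal_validate_a : Prop := ∀ (word : String), Dom_validate_a word → Spec_validate_a word (validate_a word)

-- ===== LEMMAS AND PROOFS =====

-- invariant of A's fused loop after the first character has been consumed
lemma validateA_loop_inv (l : List Char) (c : Char) (d v : Int) :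
    (l.foldl validateAStep ([c], d, v)).2 =
      (d + ((((c :: l).zip l).countP fun p => p.1 == p.2 : Nat) : Int),
       v + ((l.countP fun x => x ∈ "aeiou".toList : Nat) : Int)) := by
  induction l generalizing c d v with
  | nil => simp
  | cons a t ih =>
    simp only [List.foldl_cons, validateAStep, List.zip_cons_cons, List.countP_cons]
    rw [ih]
    by_cases h : c = a <;> by_cases hv : a ∈ "aeiou".toList <;>
      simp [h, Prod.ext_iff] <;> (first | trivial | omega)

-- membership in B's bigram set is exactly Python's 2-char substring test
lemma mem_bigramSet (l p : List Char) (hp : p.length = 2) :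
    p ∈ bigramSet l ↔ PySem.Chars.isIn p l = true := by
  rw [← PySem.Chars.exists_prefix_drop_iff_isIn]
  unfold bigramSet
  rw [PySem.Set.mem_ofList, List.mem_map]
  constructor
  · rintro ⟨i, hi, rfl⟩
    rw [PySem.List.mem_pyRange_one] at hi
    obtain ⟨h0, h1⟩ := hi
    lift i to ℕ using h0 with j
    refine ⟨j, ?_⟩
    rw [show ((j:Int) + 2) = (j:Int) + ((2:ℕ):Int) by norm_num, PySem.List.slice_natCast_add]
    exact List.take_prefix _ _
  · rintro ⟨j, hj⟩
    have hlen : j + 2 ≤ l.length := by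
      have h := hj.length_le
      rw [List.length_drop, hp] at h
      omega
    refine ⟨(j:Int), ?_, ?_⟩
    · rw [PySem.List.mem_pyRange_one]
      constructor
      · positivity
      · omega
    · rw [show ((j:Int) + 2) = (j:Int) + ((2:ℕ):Int) by norm_num, PySem.List.slice_natCast_add]
      have := List.prefix_iff_eq_take.mp hj
      rw [hp] at this
      exact this.symm

-- an adjacent equal pair is exactly a doubled bigram somewhere in the list
lemma zip_any_iff (l : List Char) :
    ((l.zip l.tail).any fun q => q.1 == q.2) = true ↔ ∃ c j, [c, c] <+: l.drop j := by
  induction l with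
  | nil => simp
  | cons a t ih =>
    cases t with
    | nil =>
      simp only [List.tail_cons, List.zip_nil_right, List.any_nil, Bool.false_eq_true, false_iff]
      rintro ⟨c, j, h⟩
      have := h.length_le
      simp [List.length_drop] at this
      omega
    | cons b t2 =>
      simp only [List.tail_cons, List.zip_cons_cons, List.any_cons, Bool.or_eq_true, beq_iff_eq]
      rw [show ((b :: t2).zip t2) = ((b :: t2).zip (b :: t2).tail) from rfl, ih]
      constructor
      · rintro (rfl | ⟨c, j, hj⟩)
        · exact ⟨a, 0, by simp⟩
        · exact ⟨c, j + 1, hj⟩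
      · rintro ⟨c, j, hj⟩
        cases j with
        | zero =>
          rw [List.drop_zero] at hj
          obtain ⟨rfl, rfl⟩ : c = a ∧ c = b := by
            rcases hj with ⟨s, hs⟩
            simp at hs
            exact ⟨hs.1, hs.2.1⟩
          exact Or.inl rfl
        | succ k => exact Or.inr ⟨c, k, hj⟩

-- B's probe of the bigram set for c+c is A's adjacent-pair scan
lemma double_iff (l : List Char) :
    ((PySem.Set.ofList l).any fun c => PySem.Set.contains (bigramSet l) [c, c])
      = ((l.zip (l.drop 1)).any fun q => q.1 == q.2) := by
  rw [List.drop_one, Bool.eq_iff_iff, zip_any_iff, List.any_eq_true]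
  constructor
  · rintro ⟨c, hc, hcon⟩
    have h := (mem_bigramSet l [c, c] rfl).mp ((PySem.Set.contains_iff _ _).mp hcon)
    rw [← PySem.Chars.exists_prefix_drop_iff_isIn] at h
    obtain ⟨j, hj⟩ := h
    exact ⟨c, j, hj⟩
  · rintro ⟨c, j, hj⟩
    refine ⟨c, ?_, ?_⟩
    · rw [PySem.Set.mem_ofList]
      exact List.mem_of_mem_drop (hj.subset (by simp))
    · rw [PySem.Set.contains_iff, mem_bigramSet l [c, c] rfl,
        ← PySem.Chars.exists_prefix_drop_iff_isIn]
      exact ⟨j, hj⟩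

-- a 0/1 count is positive iff some element satisfies the test
lemma one_le_count_iff (l : List (Char × Char)) :
    (1 ≤ ((l.countP fun q => q.1 == q.2 : Nat) : Int)) ↔ (l.any fun q => q.1 == q.2) = true := by
  rw [show (1 ≤ ((l.countP fun q => q.1 == q.2 : Nat) : Int)) ↔ 0 < l.countP fun q => q.1 == q.2 from by omega,
    List.countP_pos_iff, List.any_eq_true]

lemma count_go_singleton (v : Char) (l : List Char) (fuel acc : Nat) (h : l.length ≤ fuel) :
    PySem.Chars.count.go [v] fuel l acc = acc + l.count v := by
  induction l generalizing fuel acc with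
  | nil => cases fuel <;> simp [PySem.Chars.count.go]
  | cons a t ih =>
    cases fuel with
    | zero => simp at h
    | succ f =>
      rw [PySem.Chars.count.go]
      simp only [List.length_cons] at h
      by_cases hv : v = a
      · subst hv
        rw [if_pos (by simp [List.isPrefixOf])]
        simp only [List.length_cons, List.length_nil, List.drop_succ_cons, List.drop_zero]
        rw [ih f (acc + 1) (by omega)]
        simp
        omega
      · rw [if_neg (by simp [List.isPrefixOf, hv])]
        rw [ih f acc (by omega)]
        simp [Ne.symm hv]

-- single-character substring count is character count
lemma count_singleton (l : List Char) (v : Char) :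
    PySem.Chars.count l [v] = l.count v := by
  rw [PySem.Chars.count]
  simp only [List.isEmpty_cons, if_false, Bool.false_eq_true]
  exact (count_go_singleton v l l.length 0 le_rfl).trans (by omega)

-- summing the five per-vowel counts is counting vowel positions
lemma vowel_sum (l : List Char) :
    ("aeiou".toList.map (fun v => ((l.count v : Nat) : Int))).sum
      = ((l.countP fun x => x ∈ "aeiou".toList : Nat) : Int) := by
  have e : "aeiou".toList = ['a', 'e', 'i', 'o', 'u'] := rfl
  simp only [e, List.map_cons, List.map_nil, List.sum_cons, List.sum_nil]
  induction l with
  | nil => simp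
  | cons c t ih =>
    simp only [List.count_cons, List.countP_cons]
    by_cases h1 : c = 'a' <;> by_cases h2 : c = 'e' <;> by_cases h3 : c = 'i' <;>
      by_cases h4 : c = 'o' <;> by_cases h5 : c = 'u' <;>
      simp_all <;> omega

-- A's fused loop conjunction equals the two stateless tests, on the character list
lemma fused_eq_passes (l : List Char) :
    (decide (1 ≤ (l.foldl validateAStep (([] : List Char), (0 : Int), (0 : Int))).2.1) &&
     decide (3 ≤ (l.foldl validateAStep (([] : List Char), (0 : Int), (0 : Int))).2.2)) =
    (((l.zip (l.drop 1)).any fun p => p.1 == p.2) &&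
     decide (3 ≤ ((l.countP fun c => c ∈ "aeiou".toList : Nat) : Int))) := by
  cases l with
  | nil => simp
  | cons c t =>
    simp only [List.foldl_cons, validateAStep, List.nil_append, List.drop_succ_cons,
      List.drop_zero, List.countP_cons]
    have hne : ¬ (([c] : List Char) = [c, c]) := by simp
    have h2 := validateA_loop_inv t c
      (0 + (if (([] : List Char) ++ [c] : List Char) = [c, c] then 1 else 0))
      (0 + (if c ∈ "aeiou".toList then 1 else 0))
    rw [Prod.ext_iff] at h2
    simp only [if_neg hne, List.nil_append] at *
    simp only [h2.1, h2.2]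
    rw [show ((c :: t).zip t) = ((c :: t).zip ((c :: t).drop 1)) from rfl]
    have hany : (((c :: t).zip ((c :: t).drop 1)).any fun p => p.1 == p.2)
        = decide (1 ≤ ((((c :: t).zip ((c :: t).drop 1)).countP fun q => q.1 == q.2 : Nat) : Int)) := by
      rw [Bool.eq_iff_iff, decide_eq_true_iff]
      exact (one_le_count_iff _).symm
    rw [hany]
    by_cases hv : c ∈ "aeiou".toList <;>
      simp only [hv, if_true, if_false, decide_true, decide_false] <;>
      congr 1 <;> rw [decide_eq_decide] <;> push_cast <;> omega

-- a true test anywhere in A's forbidden chain makes A return false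
lemma chain_false (t1 t2 t3 t4 x : Bool) (h : (t1 || t2 || t3 || t4) = true) :
    (if t1 = true then false else if t2 = true then false else if t3 = true then false
     else if t4 = true then false else x) = false := by
  rcases t1 <;> rcases t2 <;> rcases t3 <;> rcases t4 <;> simp_all

-- ===== VERDICT (by name: the statement is the Claim_ definition above) =====
theorem validate_a_spec : Claim_equal_validate_a := by
  intro word _
  unfold Spec_validate_a validate_a validate_a_alt
  simp only [PySem.Str.isIn_eq]
  by_cases hforb : PySem.Set.inter (bigramSet word.toList)
      (PySem.Set.ofList ["ab".toList, "cd".toList, "pq".toList, "xy".toList]) = []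
  · rw [if_neg (not_not_intro hforb)]
    have habs : ∀ p ∈ ["ab".toList, "cd".toList, "pq".toList, "xy".toList],
        PySem.Chars.isIn p word.toList = false := by
      intro p hp
      have hl2 : p.length = 2 := by fin_cases hp <;> rfl
      rw [← Bool.not_eq_true, ← mem_bigramSet word.toList p hl2]
      intro hmem
      have hin : p ∈ PySem.Set.inter (bigramSet word.toList)
          (PySem.Set.ofList ["ab".toList, "cd".toList, "pq".toList, "xy".toList]) :=
        (PySem.Set.mem_inter _ _ _).mpr ⟨hmem, (PySem.Set.mem_ofList _ _).mpr hp⟩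
      rw [hforb] at hin
      cases hin
    rw [habs "ab".toList (by simp), habs "cd".toList (by simp),
      habs "pq".toList (by simp), habs "xy".toList (by simp)]
    simp only [Bool.false_eq_true, if_false]
    rw [fused_eq_passes word.toList, ← double_iff word.toList]
    congr 1
    rw [decide_eq_decide]
    rw [show ("aeiou".toList.map fun v => (PySem.Chars.count word.toList [v] : Int))
        = ("aeiou".toList.map fun v => ((word.toList.count v : Nat) : Int)) from by
      simp [count_singleton]]
    rw [vowel_sum]
  · rw [if_pos hforb]
    obtain ⟨p, hp⟩ := List.exists_mem_of_ne_nil _ hforb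
    rw [PySem.Set.mem_inter] at hp
    obtain ⟨hbig, hfour⟩ := hp
    rw [PySem.Set.mem_ofList] at hfour
    have hl2 : p.length = 2 := by fin_cases hfour <;> rfl
    have hisin := (mem_bigramSet word.toList p hl2).mp hbig
    apply chain_false
    fin_cases hfour <;>
      simp only [show ("ab".toList : List Char) = ['a', 'b'] from rfl,
        show ("cd".toList : List Char) = ['c', 'd'] from rfl,
        show ("pq".toList : List Char) = ['p', 'q'] from rfl,
        show ("xy".toList : List Char) = ['x', 'y'] from rfl] at hisin ⊢ <;>
      simp [hisin]
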